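-- pv_equiv track=rewrite | github.com/orlandopalmeira/Trabalho-PL-2022-2023 | src/myExc.py | getLineColFromPos
-- ===== SOURCE A (Python) =====
-- def getLineColFromPos(text, pos):
--     arr_of_lines = text.split('\n')
--     current_pos = 0
--     ant_pos = 0
--     for i, l in enumerate(arr_of_lines, start=1):
--         ant_pos = current_pos
--         current_pos += len(l) + 1 # (+1) por causa dos \n
--         if current_pos > pos:
--             col = pos - ant_pos
--             return i, col
-- ===== SOURCE B (Python) =====
-- def getLineColFromPos(text, pos):
--     if pos > len(text):
--         return None
--     newlines = 0
--     last_nl = -1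
--     for i in range(pos):
--         if text[i] == '\n':
--             newlines += 1
--             last_nl = i
--     return newlines + 1, pos - last_nl - 1
-- ===== Notes on version B (the rewrite author's own statement) =====
-- stated objective: alternative
-- what changed: B never materializes the list of lines: it guards pos > len(text) up front and makes one pass over the character indices before pos, keeping a running newline count and last-newline index, from which line and column follow directly; A instead splits the text into lines and accumulates per-line lengths until the cumulative position passes pos.
import Mathlib
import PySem

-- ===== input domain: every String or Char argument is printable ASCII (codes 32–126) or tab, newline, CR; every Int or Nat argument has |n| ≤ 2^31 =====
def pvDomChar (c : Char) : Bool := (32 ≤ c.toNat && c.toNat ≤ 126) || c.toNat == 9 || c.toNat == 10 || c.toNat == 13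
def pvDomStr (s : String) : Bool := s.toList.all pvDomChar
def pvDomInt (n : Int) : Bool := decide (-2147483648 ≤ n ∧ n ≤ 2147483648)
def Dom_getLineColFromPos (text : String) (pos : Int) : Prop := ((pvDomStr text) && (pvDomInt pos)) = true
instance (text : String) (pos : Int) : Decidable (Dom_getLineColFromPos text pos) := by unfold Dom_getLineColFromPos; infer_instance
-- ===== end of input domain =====

-- B derives line/column from a single pass over the characters before pos (running newline
-- count + last-newline index) instead of splitting the text into lines and accumulating
-- per-line lengths; same cost, different decomposition.


-- ===== PORT A =====
-- the 'for i, l in enumerate(arr_of_lines, start=1)' loop: i is the enumeration counter,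
-- cur is current_pos at the start of the iteration (ant_pos = cur)
def splitGo (pos : Int) : List (List Char) → Int → Int → Option (Int × Int)
  | [], _, _ => none
  | l :: ls, i, cur =>
    if cur + (l.length : Int) + 1 > pos then some (i, pos - cur)
    else splitGo pos ls (i + 1) (cur + (l.length : Int) + 1)

def getLineColFromPos (text : String) (pos : Int) : Option (Int × Int) :=
  splitGo pos (PySem.Chars.splitOn text.toList ['\n']) 1 0

-- ===== PORT B =====
-- the 'for i in range(pos)' loop; state = (newlines, last_nl); text[i] is always in range
-- here (0 ≤ i < pos ≤ len(text)), so PySem.List.pyGet? returning 'some' is exact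
def altGo (cs : List Char) (pos : Int) : Int × Int :=
  (PySem.List.pyRange 0 pos 1).foldl
    (fun s i => if PySem.List.pyGet? cs i = some '\n' then (s.1 + 1, i) else s) (0, -1)

def getLineColFromPos_alt (text : String) (pos : Int) : Option (Int × Int) :=
  if pos > PySem.Str.len text then none
  else
    let st := altGo text.toList pos
    some (st.1 + 1, pos - st.2 - 1)

-- ===== PRECONDITION & SPEC =====
def Spec_getLineColFromPos (text : String) (pos : Int) (out : Option (Int × Int)) : Prop := out = getLineColFromPos_alt text pos
instance (text : String) (pos : Int) (out : Option (Int × Int)) : Decidable (Spec_getLineColFromPos text pos out) := by unfold Spec_getLineColFromPos; infer_instance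

-- ===== CLAIM (what is proved, stated in full; the proofs are below) =====
def Claim_equal_getLineColFromPos : Prop := ∀ (text : String) (pos : Int), Dom_getLineColFromPos text pos → Spec_getLineColFromPos text pos (getLineColFromPos text pos)

-- ===== LEMMAS AND PROOFS =====

-- list-level views of the two ports
def Alist (cs : List Char) (pos : Int) : Option (Int × Int) :=
  splitGo pos (PySem.Chars.splitOn cs ['\n']) 1 0

def Blist (cs : List Char) (pos : Int) : Option (Int × Int) :=
  if pos > (cs.length : Int) then none
  else some ((altGo cs pos).1 + 1, pos - (altGo cs pos).2 - 1)

-- reference split on '\n' (structural recursion), proved equal to PySem.Chars.splitOn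
def consHead (p : List Char) : List (List Char) → List (List Char)
  | [] => [p]
  | x :: xs => (p ++ x) :: xs

def mySplit : List Char → List (List Char)
  | [] => [[]]
  | c :: cs => if c = '\n' then [] :: mySplit cs else consHead [c] (mySplit cs)

theorem mySplit_ne_nil (cs : List Char) : mySplit cs ≠ [] := by
  cases cs with
  | nil => simp [mySplit]
  | cons c cs =>
    simp only [mySplit]
    split
    · simp
    · cases h : mySplit cs <;> simp [consHead]

theorem consHead_nil_of_ne (xs : List (List Char)) (h : xs ≠ []) : consHead [] xs = xs := by
  cases xs with
  | nil => exact absurd rfl h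
  | cons x xs => simp [consHead]

theorem go_spec : ∀ (fuel : Nat) (l cur : List Char) (acc : List (List Char)),
    l.length < fuel →
    PySem.Chars.splitOn.go ['\n'] fuel l cur acc = acc.reverse ++ consHead cur.reverse (mySplit l) := by
  intro fuel
  induction fuel with
  | zero => intro l cur acc h; omega
  | succ f ih =>
    intro l cur acc h
    cases l with
    | nil =>
      simp [PySem.Chars.splitOn.go, mySplit, consHead]
    | cons c rest =>
      by_cases hc : c = '\n'
      · subst hc
        have hpre : List.isPrefixOf ['\n'] ('\n' :: rest) = true := by
          simp [List.isPrefixOf]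
        simp only [PySem.Chars.splitOn.go, hpre, if_pos]
        rw [show List.drop (['\n'] : List Char).length ('\n' :: rest) = rest by simp]
        rw [ih rest [] (List.reverse cur :: acc) (by simpa using Nat.lt_of_succ_lt_succ h)]
        simp only [List.reverse_nil]
        rw [consHead_nil_of_ne _ (mySplit_ne_nil rest)]
        simp [mySplit, consHead]
      · have hpre : List.isPrefixOf ['\n'] (c :: rest) = false := by
          simp [List.isPrefixOf]
          exact fun hh => absurd hh.symm hc
        simp only [PySem.Chars.splitOn.go, hpre]
        rw [if_neg (by simp)]
        rw [ih rest (c :: cur) acc (by simpa using Nat.lt_of_succ_lt_succ h)]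
        have hms := mySplit_ne_nil rest
        cases hx : mySplit rest with
        | nil => exact absurd hx hms
        | cons x xs =>
          simp [mySplit, hc, hx, consHead]

theorem splitOn_nl (cs : List Char) : PySem.Chars.splitOn cs ['\n'] = mySplit cs := by
  unfold PySem.Chars.splitOn
  rw [go_spec (cs.length + 1) cs [] [] (by omega)]
  simp [consHead_nil_of_ne _ (mySplit_ne_nil cs)]

-- shifting the enumeration counter by a and both current_pos and pos by d
theorem splitGo_shift (ls : List (List Char)) : ∀ (pos i cur a d : Int),
    splitGo (pos + d) ls (i + a) (cur + d) = (splitGo pos ls i cur).map (fun p => (p.1 + a, p.2)) := by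
  induction ls with
  | nil => intro pos i cur a d; simp [splitGo]
  | cons l ls ih =>
    intro pos i cur a d
    simp only [splitGo]
    by_cases h : cur + (l.length : Int) + 1 > pos
    · rw [if_pos (by omega), if_pos h]
      simp
    · rw [if_neg (by omega), if_neg h]
      have := ih pos (i + 1) (cur + (l.length : Int) + 1) a d
      rw [← this]; ring_nf

theorem splitGo_line_ge : ∀ (ls : List (List Char)) (pos i cur l c : Int),
    splitGo pos ls i cur = some (l, c) → i ≤ l := by
  intro ls
  induction ls with
  | nil => intro pos i cur l c h; simp [splitGo] at h
  | cons x ls ih =>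
    intro pos i cur l c h
    simp only [splitGo] at h
    split at h
    · simp at h; omega
    · have := ih pos (i + 1) (cur + (x.length : Int) + 1) l c h; omega

-- the common head-char step both ports satisfy
def pvT (c : Char) : Option (Int × Int) → Option (Int × Int)
  | none => none
  | some (l, col) =>
    if c = '\n' then some (l + 1, col)
    else if l = 1 then some (1, col + 1) else some (l, col)

theorem A_nonpos (cs : List Char) (pos : Int) (h : pos ≤ 0) : Alist cs pos = some (1, pos) := by
  unfold Alist
  rw [splitOn_nl]
  cases hx : mySplit cs with
  | nil => exact absurd hx (mySplit_ne_nil cs)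
  | cons x xs =>
    simp only [splitGo]
    rw [if_pos (by omega)]
    simp

theorem stepA (c : Char) (cs : List Char) (pos : Int) (h : 1 ≤ pos) :
    Alist (c :: cs) pos = pvT c (Alist cs (pos - 1)) := by
  unfold Alist
  rw [splitOn_nl, splitOn_nl]
  by_cases hc : c = '\n'
  · subst hc
    rw [show mySplit ('\n' :: cs) = [] :: mySplit cs by simp [mySplit]]
    simp only [splitGo, List.length_nil]
    rw [if_neg (by push_cast; omega)]
    have hs := splitGo_shift (mySplit cs) (pos - 1) 1 0 1 1
    rw [show pos - 1 + 1 = pos by ring] at hs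
    norm_num at hs ⊢
    rw [hs]
    cases hr : splitGo (pos - 1) (mySplit cs) 1 0 with
    | none => simp [pvT]
    | some p => cases p with | mk l col => simp [pvT]
  · cases hx : mySplit cs with
    | nil => exact absurd hx (mySplit_ne_nil cs)
    | cons x xs =>
      rw [show mySplit (c :: cs) = (c :: x) :: xs by
        simp [mySplit, hc, hx, consHead]]
      simp only [splitGo, List.length_cons]
      push_cast
      by_cases hcond : (0 : Int) + (x.length : Int) + 1 > pos - 1
      · rw [if_pos (by omega), if_pos (by omega)]
        simp [pvT, hc]
        try omega
      · rw [if_neg (by omega), if_neg (by omega)]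
        have hs := splitGo_shift xs (pos - 1) 2 ((0 : Int) + (x.length : Int) + 1) 0 1
        rw [show pos - 1 + 1 = pos by ring] at hs
        norm_num at hs ⊢
        rw [hs]
        cases hr : splitGo (pos - 1) xs 2 ((x.length : Int) + 1) with
        | none => simp [pvT]
        | some p =>
          cases p with
          | mk l col =>
            have hge := splitGo_line_ge xs (pos - 1) 2 ((x.length : Int) + 1) l col hr
            simp [pvT, hc]
            omega

-- B-side lemmas
theorem B_nonpos (cs : List Char) (pos : Int) (h : pos ≤ 0) : Blist cs pos = some (1, pos) := by
  unfold Blist altGo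
  rw [if_neg (by omega)]
  rw [PySem.List.pyRange_one_eq_nil (by omega)]
  simp only [List.foldl_nil]
  norm_num

theorem foldl_hom_mem {α β : Type} (xs : List α) (f : β → α → β) (g : β → α → β) (φ : β → β) :
    ∀ (s : β), (∀ s a, a ∈ xs → φ (f s a) = g (φ s) a) → φ (xs.foldl f s) = xs.foldl g (φ s) := by
  induction xs with
  | nil => intro s _; simp
  | cons x xs ih =>
    intro s hcomm
    simp only [List.foldl_cons]
    rw [← hcomm s x (by simp)]
    exact ih (f s x) (fun s a ha => hcomm s a (List.mem_cons_of_mem _ ha))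

theorem pyGet?_cons_shift (c : Char) (cs : List Char) (i : Int) (h : 0 ≤ i) :
    PySem.List.pyGet? (c :: cs) (i + 1) = PySem.List.pyGet? cs i := by
  simp only [PySem.List.pyGet?, PySem.List.pyIdx?, List.length_cons]
  push_cast
  rw [if_pos (show (0:Int) ≤ i + 1 by omega), if_pos h]
  by_cases hlt : i < (cs.length : Int)
  · rw [if_pos (show i + 1 < (cs.length : Int) + 1 by omega), if_pos hlt]
    simp only [Option.bind_some]
    rw [show (i+1).toNat = i.toNat + 1 by omega]
    simp
  · rw [if_neg (show ¬ (i + 1 < (cs.length : Int) + 1) by omega), if_neg hlt]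
    simp

theorem map_add_one_pyRange (p : Int) :
    (PySem.List.pyRange 0 (p - 1) 1).map (· + 1) = PySem.List.pyRange 1 p 1 := by
  rw [PySem.List.pyRange_one, PySem.List.pyRange_one]
  rw [show p - 1 - 0 = p - 1 by ring]
  rw [List.map_map]
  apply List.map_congr_left
  intro a _
  simp
  ring

-- invariant of B's loop state: no newline seen ↔ last_nl is still -1
def pvInv (s : Int × Int) : Prop := (s.1 = 0 ∧ s.2 = -1) ∨ (1 ≤ s.1 ∧ 0 ≤ s.2)

theorem altGo_inv (cs : List Char) (pos : Int) : pvInv (altGo cs pos) := by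
  unfold altGo
  have : ∀ (xs : List Int) (s : Int × Int), (∀ i ∈ xs, 0 ≤ i) → pvInv s →
      pvInv (xs.foldl (fun s i => if PySem.List.pyGet? cs i = some '\n' then (s.1 + 1, i) else s) s) := by
    intro xs
    induction xs with
    | nil => intro s _ hs; simpa using hs
    | cons x xs ih =>
      intro s hmem hs
      simp only [List.foldl_cons]
      apply ih _ (fun i hi => hmem i (List.mem_cons_of_mem _ hi))
      by_cases hx : PySem.List.pyGet? cs x = some '\n'
      · simp only [hx, if_pos]
        rcases hs with ⟨h1, h2⟩ | ⟨h1, h2⟩ <;>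
          exact Or.inr ⟨by omega, hmem x (by simp)⟩
      · simpa [hx] using hs
  apply this
  · intro i hi
    have := (PySem.List.mem_pyRange_one).mp hi
    omega
  · exact Or.inl ⟨rfl, rfl⟩

theorem stepB (c : Char) (cs : List Char) (pos : Int) (h : 1 ≤ pos) :
    Blist (c :: cs) pos = pvT c (Blist cs (pos - 1)) := by
  by_cases hlen : pos > (cs.length : Int) + 1
  · unfold Blist
    rw [if_pos (by simp; omega), if_pos (by omega)]
    simp [pvT]
  · unfold Blist
    rw [if_neg (by simp; omega), if_neg (by omega)]
    -- peel index 0, then shift the rest of the range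
    have hpeel : altGo (c :: cs) pos =
        (PySem.List.pyRange 1 pos 1).foldl
          (fun s i => if PySem.List.pyGet? (c :: cs) i = some '\n' then (s.1 + 1, i) else s)
          (if c = '\n' then (1, 0) else (0, -1)) := by
      unfold altGo
      rw [PySem.List.pyRange_one_cons (by omega)]
      simp only [List.foldl_cons]
      congr 1
      have h0 : PySem.List.pyGet? (c :: cs) 0 = some c := by
        simp [PySem.List.pyGet?, PySem.List.pyIdx?]
      rw [h0]
      by_cases hc2 : c = '\n' <;> simp [hc2]
    set φ : Int × Int → Int × Int := fun s =>
      if c = '\n' then (s.1 + 1, if s.2 = -1 then 0 else s.2 + 1)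
      else (s.1, if s.2 = -1 then -1 else s.2 + 1) with hφ
    have hshift : altGo (c :: cs) pos = φ (altGo cs (pos - 1)) := by
      rw [hpeel, ← map_add_one_pyRange pos]
      unfold altGo
      rw [List.foldl_map]
      have hcomm : ∀ (s : Int × Int) (i : Int), i ∈ PySem.List.pyRange 0 (pos - 1) 1 →
          φ (if PySem.List.pyGet? cs i = some '\n' then (s.1 + 1, i) else s) =
          (if PySem.List.pyGet? (c :: cs) (i + 1) = some '\n' then ((φ s).1 + 1, i + 1) else φ s) := by
        intro s i hi
        have hi0 : 0 ≤ i := by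
          have := (PySem.List.mem_pyRange_one).mp hi; omega
        rw [pyGet?_cons_shift c cs i hi0]
        by_cases hx : PySem.List.pyGet? cs i = some '\n'
        · have hne : ¬ i = -1 := by omega
          simp only [hx, if_pos, hφ]
          by_cases hcpr : c = '\n' <;> simp [hcpr, hne]
        · simp [hx]
      have := foldl_hom_mem (PySem.List.pyRange 0 (pos - 1) 1)
        (fun s i => if PySem.List.pyGet? cs i = some '\n' then (s.1 + 1, i) else s)
        (fun s i => if PySem.List.pyGet? (c :: cs) (i + 1) = some '\n' then (s.1 + 1, i + 1) else s)
        φ (0, -1) hcomm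
      rw [show (if c = '\n' then ((1:Int), (0:Int)) else ((0:Int), (-1:Int))) = φ (0, -1) by
        by_cases hcpr : c = '\n' <;> simp [hφ, hcpr]]
      exact this.symm
    rw [hshift]
    have hinv := altGo_inv cs (pos - 1)
    rcases haltv : altGo cs (pos - 1) with ⟨n, l⟩
    rw [haltv] at hinv
    by_cases hcpr : c = '\n'
    · rcases hinv with ⟨h1, h2⟩ | ⟨h1, h2⟩
      · subst h2
        simp [hφ, hcpr, pvT]
        try omega
      · have hne : ¬ l = -1 := by omega
        simp [hφ, hcpr, hne, pvT, Prod.ext_iff]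
        try omega
    · rcases hinv with ⟨h1, h2⟩ | ⟨h1, h2⟩
      · subst h1; subst h2
        simp [hφ, hcpr, pvT]
        try omega
      · have hne : ¬ l = -1 := by omega
        simp [hφ, hcpr, hne, pvT, Prod.ext_iff, show ¬ (n + 1 = 1) by omega]
        try omega

theorem AB (cs : List Char) : ∀ (pos : Int), Alist cs pos = Blist cs pos := by
  induction cs with
  | nil =>
    intro pos
    by_cases h : pos ≤ 0
    · rw [A_nonpos _ _ h, B_nonpos _ _ h]
    · unfold Alist Blist altGo
      rw [splitOn_nl]
      simp only [mySplit, splitGo]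
      rw [if_neg (show ¬ ((0:Int) + ((([] : List Char).length : Int)) + 1 > pos) by
        simp only [List.length_nil, Int.natCast_zero]; omega)]
      rw [if_pos (show pos > ((([] : List Char).length : Int)) by
        simp only [List.length_nil, Int.natCast_zero]; omega)]
  | cons c cs ih =>
    intro pos
    by_cases h : pos ≤ 0
    · rw [A_nonpos _ _ h, B_nonpos _ _ h]
    · rw [stepA c cs pos (by omega), stepB c cs pos (by omega), ih (pos - 1)]

-- ===== VERDICT (by name: the statement is the Claim_ definition above) =====
theorem getLineColFromPos_spec : Claim_equal_getLineColFromPos := by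
  intro text pos _
  unfold Spec_getLineColFromPos
  have := AB text.toList pos
  unfold Alist Blist at this
  unfold getLineColFromPos getLineColFromPos_alt
  simp only [PySem.Str.len_eq]
  rw [this]
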